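-- pv_equiv track=rewrite | github.com/AggelosKwstas/Maximum-SubArray-Problem | solution.py | calculate_prefix
-- ===== SOURCE A (Python) =====
-- def calculate_prefix(test_list):
--     size = len(test_list)
--     res = [0] * size
--     res[0] = test_list[0]
--     max_sum, start, end = test_list[0], 0, 0
--     for i in range(1, len(test_list)):
--         res[i] = res[i - 1] + test_list[i]
--
--     for i in range(len(test_list)):
--         for j in range(i, len(test_list)):
--             sum = res[j] if i == 0 else res[j] - res[i - 1]
--
--             if max_sum < sum:
--                 max_sum, start, end = sum, i, j
--
--     return "max is: " + str(max_sum) + "      " + "start index is : " + str(start) + "      " + "end index is : " + str(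
--         end)
-- ===== SOURCE B (Python) =====
-- def calculate_prefix(test_list):
--     # One-pass prefix-minimum scan (Kadane-style): O(n) instead of O(n^2).
--     best, bs, be = test_list[0], 0, 0
--     prefix = 0            # running prefix sum P[j+1]
--     min_prefix, min_idx = 0, 0   # minimum prefix sum P[i] over i <= j, earliest index
--     for j, x in enumerate(test_list):
--         prefix += x
--         cand = prefix - min_prefix
--         if cand > best:
--             best, bs, be = cand, min_idx, j
--         if prefix < min_prefix:
--             min_prefix, min_idx = prefix, j + 1
--     return "max is: " + str(best) + "      " + "start index is : " + str(bs) + "      " + "end index is : " + str(be)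
-- ===== Notes on version B (the rewrite author's own statement) =====
-- stated objective: faster
-- what changed: Replaced the O(n^2) scan over all (start,end) pairs of prefix-sum differences by a single O(n) pass that tracks the running prefix sum and its earliest minimum, updating the best strictly so ties keep the lexicographically earliest (start,end) exactly as A does; Pre_ excludes only the empty list, on which both raise IndexError.
import Mathlib
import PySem

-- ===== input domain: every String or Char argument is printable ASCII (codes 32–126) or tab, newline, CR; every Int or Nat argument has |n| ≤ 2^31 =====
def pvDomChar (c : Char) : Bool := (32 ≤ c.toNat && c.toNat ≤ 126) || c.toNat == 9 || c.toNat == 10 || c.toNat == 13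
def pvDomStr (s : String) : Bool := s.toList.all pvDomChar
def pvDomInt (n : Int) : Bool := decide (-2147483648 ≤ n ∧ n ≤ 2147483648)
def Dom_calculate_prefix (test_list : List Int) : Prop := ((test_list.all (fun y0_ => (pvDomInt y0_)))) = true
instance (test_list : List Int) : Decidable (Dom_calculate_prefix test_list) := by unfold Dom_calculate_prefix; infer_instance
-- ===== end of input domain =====

-- B replaces A's O(n^2) all-pairs scan by a single O(n) prefix-minimum (Kadane-style) pass; equal output on every nonempty list.

-- ===== PORT A =====
-- literal port of A: build prefix-sum list res, then scan all (i, j) pairs, strict update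
def calculate_prefix (test_list : List Int) : String :=
  let size := test_list.length
  let res0 : List Int := List.replicate size 0
  let res0 := PySem.List.pySetD res0 0 (PySem.List.pyGetD test_list 0 0)   -- Python: res and test_list indexed at zero (IndexError on empty input excluded by Pre_)
  let max_sum : Int := PySem.List.pyGetD test_list 0 0
  let start : Int := 0
  let «end» : Int := 0
  let res := (PySem.List.pyRange 1 (test_list.length : Int) 1).foldl
      (fun r i => PySem.List.pySetD r i (PySem.List.pyGetD r (i - 1) 0 + PySem.List.pyGetD test_list i 0)) res0
  let st := (PySem.List.pyRange 0 (test_list.length : Int) 1).foldl (fun st i =>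
      (PySem.List.pyRange i (test_list.length : Int) 1).foldl (fun st j =>
        let sum := if i = 0 then PySem.List.pyGetD res j 0
                   else PySem.List.pyGetD res j 0 - PySem.List.pyGetD res (i - 1) 0
        if st.1 < sum then (sum, i, j) else st) st) (max_sum, start, «end»)
  "max is: " ++ PySem.Int.toStr st.1 ++ "      " ++ "start index is : " ++ PySem.Int.toStr st.2.1
    ++ "      " ++ "end index is : " ++ PySem.Int.toStr st.2.2

-- ===== PORT B =====
-- literal port of B (Source B): one pass, state (best, bs, be, prefix, min_prefix, min_idx)
def calculate_prefix_alt (test_list : List Int) : String :=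
  let best : Int := PySem.List.pyGetD test_list 0 0
  let st := (PySem.List.enumerate test_list 0).foldl (fun s p =>
      let pref := s.2.2.2.1 + p.2
      let cand := pref - s.2.2.2.2.1
      let b3 := if s.1 < cand then (cand, s.2.2.2.2.2, p.1) else (s.1, s.2.1, s.2.2.1)
      let m2 := if pref < s.2.2.2.2.1 then (pref, p.1 + 1) else (s.2.2.2.2.1, s.2.2.2.2.2)
      (b3.1, b3.2.1, b3.2.2, pref, m2.1, m2.2)) (best, 0, 0, 0, 0, 0)
  "max is: " ++ PySem.Int.toStr st.1 ++ "      " ++ "start index is : " ++ PySem.Int.toStr st.2.1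
    ++ "      " ++ "end index is : " ++ PySem.Int.toStr st.2.2.1

-- ===== PRECONDITION & SPEC =====
-- Pre_ excludes only the empty list, on which both A and B raise IndexError at the first-element access.
def Pre_calculate_prefix (test_list : List Int) : Prop := test_list ≠ []
instance (test_list : List Int) : Decidable (Pre_calculate_prefix test_list) := by
  unfold Pre_calculate_prefix; infer_instance
def pvWitness_calculate_prefix : List Int := [2, -1, 3]

def Spec_calculate_prefix (test_list : List Int) (out : String) : Prop := out = calculate_prefix_alt test_list
instance (test_list : List Int) (out : String) : Decidable (Spec_calculate_prefix test_list out) := by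
  unfold Spec_calculate_prefix; infer_instance

-- ===== CLAIM (what is proved, stated in full; the proofs are below) =====
def Claim_equal_calculate_prefix : Prop := ∀ (test_list : List Int), Dom_calculate_prefix test_list → Pre_calculate_prefix test_list → Spec_calculate_prefix test_list (calculate_prefix test_list)

-- ===== LEMMAS AND PROOFS =====

-- prefix sums with Int index (Python-style): sum of the first k elements
def pvPfx (xs : List Int) (k : Int) : Int := (xs.take k.toNat).sum
-- sum of the subarray xs[i..j] (inclusive)
def pvSv (xs : List Int) (i j : Int) : Int := pvPfx xs (j + 1) - pvPfx xs i
-- lexicographic (≤) and (<) on index pairs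
def pvLexle (s e i j : Int) : Prop := s < i ∨ (s = i ∧ e ≤ j)
def pvPlex (p q : Int × Int) : Prop := p.1 < q.1 ∨ (p.1 = q.1 ∧ p.2 < q.2)
-- the common specification: t is (max subarray sum, lexicographically least achieving pair)
def pvGood (xs : List Int) (t : Int × Int × Int) : Prop :=
  0 ≤ t.2.1 ∧ t.2.1 ≤ t.2.2 ∧ t.2.2 < (xs.length : Int) ∧ t.1 = pvSv xs t.2.1 t.2.2 ∧
  (∀ i j : Int, 0 ≤ i → i ≤ j → j < (xs.length : Int) → pvSv xs i j ≤ t.1) ∧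
  (∀ i j : Int, 0 ≤ i → i ≤ j → j < (xs.length : Int) → pvSv xs i j = t.1 → pvLexle t.2.1 t.2.2 i j)

lemma pvGood_unique (xs : List Int) (t t' : Int × Int × Int)
    (h : pvGood xs t) (h' : pvGood xs t') : t = t' := by
  obtain ⟨h1, h2, h3, h4, h5, h6⟩ := h
  obtain ⟨h1', h2', h3', h4', h5', h6'⟩ := h'
  have hm : t.1 = t'.1 := le_antisymm (h4 ▸ h5' t.2.1 t.2.2 h1 h2 h3) (h4' ▸ h5 t'.2.1 t'.2.2 h1' h2' h3')
  have l1 := h6 t'.2.1 t'.2.2 h1' h2' h3' (by rw [← h4', hm])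
  have l2 := h6' t.2.1 t.2.2 h1 h2 h3 (by rw [← h4, ← hm])
  unfold pvLexle at l1 l2
  have : t.2.1 = t'.2.1 ∧ t.2.2 = t'.2.2 := by omega
  exact Prod.ext hm (Prod.ext this.1 this.2)

-- basic prefix-sum facts
lemma pvPfx_zero (xs : List Int) : pvPfx xs 0 = 0 := rfl

lemma pvPfx_one (xs : List Int) (h : xs ≠ []) : pvPfx xs 1 = xs.getD 0 0 := by
  cases xs with
  | nil => simp at h
  | cons y t => simp [pvPfx]

lemma pvPfx_succ (xs : List Int) (k : Nat) (hk : k < xs.length) :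
    pvPfx xs ((k : Int) + 1) = pvPfx xs k + xs[k] := by
  have : ((k : Int) + 1).toNat = k + 1 := by omega
  have hT : ((k : Int)).toNat = k := by omega
  simp only [pvPfx, this, hT]
  exact List.sum_take_succ xs k hk

lemma pvPfx_append_le (xs : List Int) (x : Int) (k : Int) (hk : k ≤ (xs.length : Int)) :
    pvPfx (xs ++ [x]) k = pvPfx xs k := by
  unfold pvPfx
  rw [List.take_append_of_le_length (by omega)]

lemma pvPfx_append_full (xs : List Int) (x : Int) :
    pvPfx (xs ++ [x]) ((xs.length : Int) + 1) = pvPfx xs (xs.length : Int) + x := by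
  unfold pvPfx
  have h1 : ((xs.length : Int) + 1).toNat = xs.length + 1 := by omega
  have h2 : ((xs.length : Int)).toNat = xs.length := by omega
  rw [h1, h2, List.take_of_length_le (by simp), List.take_of_length_le (by simp)]
  simp

lemma pvSv_append (xs : List Int) (x : Int) (i j : Int) (_h0 : 0 ≤ i) (hij : i ≤ j) (hj : j < (xs.length : Int)) :
    pvSv (xs ++ [x]) i j = pvSv xs i j := by
  unfold pvSv
  rw [pvPfx_append_le xs x (j+1) (by omega), pvPfx_append_le xs x i (by omega)]

-- ========== A side ==========
-- the prefix-sum list A builds (exactly the fold in the port)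
def pvAres (xs : List Int) : List Int :=
  (PySem.List.pyRange 1 (xs.length : Int) 1).foldl
    (fun r i => PySem.List.pySetD r i (PySem.List.pyGetD r (i - 1) 0 + PySem.List.pyGetD xs i 0))
    (PySem.List.pySetD (List.replicate xs.length 0) 0 (PySem.List.pyGetD xs 0 0))

-- A's value function over the pair (i, j)
def pvW (xs : List Int) (p : Int × Int) : Int :=
  if p.1 = 0 then PySem.List.pyGetD (pvAres xs) p.2 0
  else PySem.List.pyGetD (pvAres xs) p.2 0 - PySem.List.pyGetD (pvAres xs) (p.1 - 1) 0

-- A's triple (the whole computation before rendering)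
def pvAfold (xs : List Int) : Int × Int × Int :=
  (PySem.List.pyRange 0 (xs.length : Int) 1).foldl (fun st i =>
      (PySem.List.pyRange i (xs.length : Int) 1).foldl (fun st j =>
        let sum := if i = 0 then PySem.List.pyGetD (pvAres xs) j 0
                   else PySem.List.pyGetD (pvAres xs) j 0 - PySem.List.pyGetD (pvAres xs) (i - 1) 0
        if st.1 < sum then (sum, i, j) else st) st)
    (PySem.List.pyGetD xs 0 0, 0, 0)

lemma pvA_render (xs : List Int) :
    calculate_prefix xs = "max is: " ++ PySem.Int.toStr (pvAfold xs).1 ++ "      " ++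
      "start index is : " ++ PySem.Int.toStr (pvAfold xs).2.1 ++ "      " ++
      "end index is : " ++ PySem.Int.toStr (pvAfold xs).2.2 := rfl

lemma pvAres_partial (xs : List Int) (hxs : xs ≠ []) (k : Nat) (h1 : 1 ≤ k) (hk : k ≤ xs.length) :
    ((PySem.List.pyRange 1 (k : Int) 1).foldl
      (fun r i => PySem.List.pySetD r i (PySem.List.pyGetD r (i - 1) 0 + PySem.List.pyGetD xs i 0))
      (PySem.List.pySetD (List.replicate xs.length 0) 0 (PySem.List.pyGetD xs 0 0))).length = xs.length ∧
    ∀ j : Nat, j < k →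
      ((PySem.List.pyRange 1 (k : Int) 1).foldl
        (fun r i => PySem.List.pySetD r i (PySem.List.pyGetD r (i - 1) 0 + PySem.List.pyGetD xs i 0))
        (PySem.List.pySetD (List.replicate xs.length 0) 0 (PySem.List.pyGetD xs 0 0)))[j]? =
        some (pvPfx xs ((j : Int) + 1)) := by
  have hn : 0 < xs.length := List.length_pos_iff.mpr hxs
  revert hk
  induction k, h1 using Nat.le_induction with
  | base =>
    intro hk
    rw [show ((1:Nat):Int) = 1 from rfl, PySem.List.pyRange_one_eq_nil le_rfl, List.foldl_nil]
    rw [PySem.List.pySetD_of_nonneg _ _ (by norm_num)]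
    constructor
    · simp
    · intro j hj
      have hj0 : j = 0 := by omega
      subst hj0
      rw [show ((0:Int)).toNat = 0 from rfl]
      rw [List.getElem?_set_self (by simpa using hn)]
      rw [PySem.List.pyGetD_zero]
      rw [show ((0:Nat):Int) + 1 = 1 from rfl, pvPfx_one xs hxs]
  | succ k hk1 ih =>
    intro hk
    obtain ⟨ihl, ihv⟩ := ih (by omega)
    have hcast : ((k+1 : Nat) : Int) = (k : Int) + 1 := by omega
    rw [hcast, PySem.List.pyRange_one_succ_right (by exact_mod_cast hk1), List.foldl_append,
      List.foldl_cons, List.foldl_nil]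
    set rk := (PySem.List.pyRange 1 (k : Int) 1).foldl
      (fun r i => PySem.List.pySetD r i (PySem.List.pyGetD r (i - 1) 0 + PySem.List.pyGetD xs i 0))
      (PySem.List.pySetD (List.replicate xs.length 0) 0 (PySem.List.pyGetD xs 0 0)) with hrk
    have hkn : k < xs.length := by omega
    have hv1 : PySem.List.pyGetD rk ((k:Int) - 1) 0 = pvPfx xs (k : Int) := by
      rw [show (k:Int) - 1 = ((k-1 : Nat) : Int) by omega]
      rw [PySem.List.pyGetD_natCast]
      rw [List.getD_eq_getElem?_getD, ihv (k-1) (by omega)]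
      simp only [Option.getD_some]
      congr 1
      omega
    have hv2 : PySem.List.pyGetD xs (k:Int) 0 = xs[k] := by
      rw [PySem.List.pyGetD_natCast]
      exact List.getD_eq_getElem xs 0 hkn
    rw [hv1, hv2, ← pvPfx_succ xs k hkn]
    rw [PySem.List.pySetD_natCast]
    constructor
    · simp [ihl]
    · intro j hj
      by_cases hjk : j = k
      · subst hjk
        rw [List.getElem?_set_self (by omega)]
      · rw [List.getElem?_set_ne (fun h => hjk h.symm)]
        exact ihv j (by omega)

lemma pvAres_spec (xs : List Int) (hxs : xs ≠ []) (j : Nat) (hj : j < xs.length) :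
    (pvAres xs)[j]? = some (pvPfx xs ((j : Int) + 1)) := by
  exact (pvAres_partial xs hxs xs.length (by omega) le_rfl).2 j hj

lemma pvW_eq (xs : List Int) (hxs : xs ≠ []) (i j : Int)
    (h0 : 0 ≤ i) (hij : i ≤ j) (hj : j < (xs.length : Int)) :
    pvW xs (i, j) = pvSv xs i j := by
  have hn : 0 < xs.length := List.length_pos_iff.mpr hxs
  have hjget : PySem.List.pyGetD (pvAres xs) j 0 = pvPfx xs (j + 1) := by
    rw [show j = ((j.toNat : Nat) : Int) by omega, PySem.List.pyGetD_natCast]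
    rw [List.getD_eq_getElem?_getD, pvAres_spec xs hxs j.toNat (by omega)]
    simp
  unfold pvW pvSv
  split_ifs with hi
  · simp only at hi
    rw [hjget, hi, pvPfx_zero]
    ring
  · simp only at hi
    have higet : PySem.List.pyGetD (pvAres xs) (i - 1) 0 = pvPfx xs i := by
      rw [show i - 1 = (((i-1).toNat : Nat) : Int) by omega, PySem.List.pyGetD_natCast]
      rw [List.getD_eq_getElem?_getD, pvAres_spec xs hxs (i-1).toNat (by omega)]
      simp only [Option.getD_some]
      congr 1
      omega
    rw [hjget, higet]

-- generic first-argmax fold over a strictly lex-sorted candidate list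
lemma pvFoldArgmax (w : Int × Int → Int) (L : List (Int × Int)) (st : Int × Int × Int)
    (hst : ∀ p ∈ L, pvPlex (st.2.1, st.2.2) p) (hL : L.Pairwise pvPlex) :
    ((L.foldl (fun s p => if s.1 < w p then (w p, p.1, p.2) else s) st) = st ∨
      ∃ p ∈ L, ((L.foldl (fun s p => if s.1 < w p then (w p, p.1, p.2) else s) st).2.1,
                (L.foldl (fun s p => if s.1 < w p then (w p, p.1, p.2) else s) st).2.2) = p ∧
               (L.foldl (fun s p => if s.1 < w p then (w p, p.1, p.2) else s) st).1 = w p) ∧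
    st.1 ≤ (L.foldl (fun s p => if s.1 < w p then (w p, p.1, p.2) else s) st).1 ∧
    (∀ p ∈ L, w p ≤ (L.foldl (fun s p => if s.1 < w p then (w p, p.1, p.2) else s) st).1) ∧
    (∀ p ∈ L, w p = (L.foldl (fun s p => if s.1 < w p then (w p, p.1, p.2) else s) st).1 →
      ((L.foldl (fun s p => if s.1 < w p then (w p, p.1, p.2) else s) st).2.1,
       (L.foldl (fun s p => if s.1 < w p then (w p, p.1, p.2) else s) st).2.2) = p ∨
      pvPlex ((L.foldl (fun s p => if s.1 < w p then (w p, p.1, p.2) else s) st).2.1,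
              (L.foldl (fun s p => if s.1 < w p then (w p, p.1, p.2) else s) st).2.2) p) ∧
    ((L.foldl (fun s p => if s.1 < w p then (w p, p.1, p.2) else s) st) ≠ st →
      st.1 < (L.foldl (fun s p => if s.1 < w p then (w p, p.1, p.2) else s) st).1) := by
  induction L generalizing st with
  | nil => simp
  | cons p L ih =>
    rw [List.pairwise_cons] at hL
    obtain ⟨hpL, hLpw⟩ := hL
    simp only [List.foldl_cons, List.mem_cons]
    by_cases h : st.1 < w p
    · rw [if_pos h]
      obtain ⟨c1, c2, c3, c4, c5⟩ := ih (w p, p.1, p.2) (by intro q hq; simpa using hpL q hq) hLpw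
      set r := L.foldl (fun s q => if s.1 < w q then (w q, q.1, q.2) else s) (w p, p.1, p.2) with hr
      refine ⟨?_, ?_, ?_, ?_, ?_⟩
      · rcases c1 with h1 | ⟨q, hq, hq2, hq3⟩
        · exact Or.inr ⟨p, Or.inl rfl, by rw [h1], by rw [h1]⟩
        · exact Or.inr ⟨q, Or.inr hq, hq2, hq3⟩
      · exact le_of_lt (lt_of_lt_of_le h c2)
      · rintro q (rfl | hq)
        · exact c2
        · exact c3 q hq
      · rintro q (rfl | hq) hwq
        · by_cases hre : r = (w q, q.1, q.2)
          · exact Or.inl (by rw [hre])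
          · exact absurd (c5 hre) (by rw [hwq]; exact lt_irrefl _)
        · exact c4 q hq hwq
      · intro _; exact lt_of_lt_of_le h c2
    · rw [if_neg h]
      obtain ⟨c1, c2, c3, c4, c5⟩ := ih st (fun q hq => hst q (List.mem_cons_of_mem p hq)) hLpw
      set r := L.foldl (fun s q => if s.1 < w q then (w q, q.1, q.2) else s) st with hr
      refine ⟨?_, ?_, ?_, ?_, ?_⟩
      · rcases c1 with h1 | ⟨q, hq, hq2, hq3⟩
        · exact Or.inl h1
        · exact Or.inr ⟨q, Or.inr hq, hq2, hq3⟩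
      · exact c2
      · rintro q (rfl | hq)
        · exact le_trans (not_lt.mp h) c2
        · exact c3 q hq
      · rintro q (rfl | hq) hwq
        · have hple : w q ≤ st.1 := not_lt.mp h
          have heq : st.1 = r.1 := le_antisymm c2 (hwq ▸ hple)
          have hre : r = st := by
            by_contra hne
            exact absurd (c5 hne) (by omega)
          exact Or.inr (by rw [hre]; exact hst q (List.mem_cons_self ..))
        · exact c4 q hq hwq
      · exact c5

-- the list of all index pairs A's double loop visits, in visit (lexicographic) order
def pvPairs (n : Int) : List (Int × Int) :=
  (PySem.List.pyRange 0 n 1).flatMap (fun i => (PySem.List.pyRange i n 1).map (fun j => (i, j)))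

lemma pvPairs_mem (n : Int) (p : Int × Int) :
    p ∈ pvPairs n ↔ 0 ≤ p.1 ∧ p.1 ≤ p.2 ∧ p.2 < n := by
  unfold pvPairs
  simp only [List.mem_flatMap, List.mem_map, PySem.List.mem_pyRange_one]
  constructor
  · rintro ⟨i, ⟨hi0, hin⟩, j, ⟨hij, hjn⟩, rfl⟩
    exact ⟨hi0, hij, hjn⟩
  · rintro ⟨h1, h2, h3⟩
    exact ⟨p.1, ⟨h1, by omega⟩, p.2, ⟨h2, h3⟩, rfl⟩

lemma pvPairs_pairwise (n : Int) : (pvPairs n).Pairwise pvPlex := by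
  unfold pvPairs
  refine List.pairwise_flatMap.mpr ⟨?_, ?_⟩
  · intro i hi
    exact List.Pairwise.map _ (fun a b hab => Or.inr ⟨rfl, hab⟩)
      (PySem.List.pairwise_lt_pyRange_one i n)
  · refine (PySem.List.pairwise_lt_pyRange_one 0 n).imp ?_
    intro a b hab
    rintro p hp q hq
    simp only [List.mem_map] at hp hq
    obtain ⟨j1, _, rfl⟩ := hp
    obtain ⟨j2, _, rfl⟩ := hq
    exact Or.inl hab

lemma pvPairs_head (n : Int) (hn : 0 < n) :
    pvPairs n = (0, 0) ::
      ((PySem.List.pyRange 1 n 1).map (fun j => ((0:Int), j)) ++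
       (PySem.List.pyRange 1 n 1).flatMap (fun i => (PySem.List.pyRange i n 1).map (fun j => (i, j)))) := by
  unfold pvPairs
  rw [PySem.List.pyRange_one_cons hn, List.flatMap_cons, PySem.List.pyRange_one_cons hn,
    List.map_cons]
  norm_num

lemma pvAfold_eq_pairs (xs : List Int) :
    pvAfold xs = (pvPairs (xs.length : Int)).foldl
      (fun s p => if s.1 < pvW xs p then (pvW xs p, p.1, p.2) else s)
      (PySem.List.pyGetD xs 0 0, 0, 0) := by
  unfold pvAfold pvPairs
  rw [List.foldl_flatMap]
  congr 1
  funext st i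
  rw [List.foldl_map]
  rfl

lemma pvSv_zero (xs : List Int) (hxs : xs ≠ []) : pvSv xs 0 0 = PySem.List.pyGetD xs 0 0 := by
  unfold pvSv
  rw [show (0:Int)+1 = 1 from rfl, pvPfx_one xs hxs, pvPfx_zero, PySem.List.pyGetD_zero]
  ring

lemma pvA_good (xs : List Int) (hxs : xs ≠ []) : pvGood xs (pvAfold xs) := by
  have hn : 0 < xs.length := List.length_pos_iff.mpr hxs
  have hnI : (0:Int) < (xs.length : Int) := by exact_mod_cast hn
  have hT := pvPairs_head (xs.length : Int) hnI
  set T := ((PySem.List.pyRange 1 (xs.length:Int) 1).map (fun j => ((0:Int), j)) ++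
       (PySem.List.pyRange 1 (xs.length:Int) 1).flatMap
         (fun i => (PySem.List.pyRange i (xs.length:Int) 1).map (fun j => (i, j)))) with hTdef
  have hpw := pvPairs_pairwise (xs.length : Int)
  rw [hT, List.pairwise_cons] at hpw
  obtain ⟨h00, hTpw⟩ := hpw
  have hw00 : pvW xs (0, 0) = PySem.List.pyGetD xs 0 0 := by
    rw [pvW_eq xs hxs 0 0 le_rfl le_rfl hnI, pvSv_zero xs hxs]
  have hfold : pvAfold xs = T.foldl
      (fun s p => if s.1 < pvW xs p then (pvW xs p, p.1, p.2) else s)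
      (PySem.List.pyGetD xs 0 0, 0, 0) := by
    rw [pvAfold_eq_pairs, hT, List.foldl_cons]
    congr 1
    show (if (PySem.List.pyGetD xs 0 0, (0:Int), (0:Int)).1 < pvW xs (0,0) then _ else _) = _
    rw [if_neg (by rw [hw00]; exact lt_irrefl _)]
  obtain ⟨c1, c2, c3, c4, c5⟩ :=
    pvFoldArgmax (pvW xs) T (PySem.List.pyGetD xs 0 0, 0, 0) h00 hTpw
  rw [← hfold] at c1 c2 c3 c4 c5
  have hmemT : ∀ p, p ∈ T → 0 ≤ p.1 ∧ p.1 ≤ p.2 ∧ p.2 < (xs.length:Int) := by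
    intro p hp
    have hmm : p ∈ pvPairs (xs.length:Int) := by
      rw [hT]; exact List.mem_cons_of_mem _ hp
    exact (pvPairs_mem _ p).mp hmm
  have hmem' : ∀ i j : Int, 0 ≤ i → i ≤ j → j < (xs.length:Int) →
      ((i,j) : Int × Int) = (0,0) ∨ ((i,j) : Int × Int) ∈ T := by
    intro i j u1 u2 u3
    have hmm : ((i,j) : Int × Int) ∈ pvPairs (xs.length:Int) :=
      (pvPairs_mem _ _).mpr ⟨u1, u2, u3⟩
    rw [hT] at hmm
    exact List.mem_cons.mp hmm
  refine ⟨?_, ?_, ?_, ?_, ?_, ?_⟩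
  · rcases c1 with h1 | ⟨p, hp, hp2, hp3⟩
    · rw [h1]
    · rw [congrArg Prod.fst hp2]; exact (hmemT p hp).1
  · rcases c1 with h1 | ⟨p, hp, hp2, hp3⟩
    · rw [h1]
    · rw [congrArg Prod.fst hp2, congrArg Prod.snd hp2]; exact (hmemT p hp).2.1
  · rcases c1 with h1 | ⟨p, hp, hp2, hp3⟩
    · rw [h1]; exact hnI
    · rw [congrArg Prod.snd hp2]; exact (hmemT p hp).2.2
  · rcases c1 with h1 | ⟨p, hp, hp2, hp3⟩
    · rw [h1]; exact (pvSv_zero xs hxs).symm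
    · obtain ⟨b1, b2, b3⟩ := hmemT p hp
      have hpe := pvW_eq xs hxs p.1 p.2 b1 b2 b3
      rw [show ((p.1, p.2) : Int × Int) = p from rfl] at hpe
      rw [congrArg Prod.fst hp2, congrArg Prod.snd hp2, hp3, hpe]
  · intro i j u1 u2 u3
    rcases hmem' i j u1 u2 u3 with heq | hmem
    · rw [Prod.mk.injEq] at heq
      obtain ⟨rfl, rfl⟩ := heq
      rw [pvSv_zero xs hxs]
      exact c2
    · have := c3 (i,j) hmem
      rwa [pvW_eq xs hxs i j u1 u2 u3] at this
  · intro i j u1 u2 u3 heqv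
    rcases hmem' i j u1 u2 u3 with heq | hmem
    · rw [Prod.mk.injEq] at heq
      obtain ⟨rfl, rfl⟩ := heq
      have hr : pvAfold xs = (PySem.List.pyGetD xs 0 0, 0, 0) := by
        by_contra hne
        have := c5 hne
        rw [pvSv_zero xs hxs] at heqv
        simp only at this
        omega
      rw [hr]
      exact Or.inr ⟨rfl, le_rfl⟩
    · have hc := c4 (i,j) hmem (by rw [pvW_eq xs hxs i j u1 u2 u3]; exact heqv)
      rcases hc with he | hlt
      · exact Or.inr ⟨congrArg Prod.fst he, le_of_eq (congrArg Prod.snd he)⟩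
      · rcases hlt with h | ⟨h, h'⟩
        · exact Or.inl h
        · exact Or.inr ⟨h, le_of_lt h'⟩

-- ========== B side ==========
def pvBstep (s : Int × Int × Int × Int × Int × Int) (p : Int × Int) :
    Int × Int × Int × Int × Int × Int :=
  let pref := s.2.2.2.1 + p.2
  let cand := pref - s.2.2.2.2.1
  let b3 := if s.1 < cand then (cand, s.2.2.2.2.2, p.1) else (s.1, s.2.1, s.2.2.1)
  let m2 := if pref < s.2.2.2.2.1 then (pref, p.1 + 1) else (s.2.2.2.2.1, s.2.2.2.2.2)
  (b3.1, b3.2.1, b3.2.2, pref, m2.1, m2.2)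

def pvBfold (xs : List Int) : Int × Int × Int × Int × Int × Int :=
  (PySem.List.enumerate xs 0).foldl pvBstep (PySem.List.pyGetD xs 0 0, 0, 0, 0, 0, 0)

lemma pvB_render (xs : List Int) :
    calculate_prefix_alt xs = "max is: " ++ PySem.Int.toStr (pvBfold xs).1 ++ "      " ++
      "start index is : " ++ PySem.Int.toStr (pvBfold xs).2.1 ++ "      " ++
      "end index is : " ++ PySem.Int.toStr (pvBfold xs).2.2.1 := rfl

-- B's loop invariant: best triple is pvGood, pref is the full prefix sum,
-- (min_prefix, min_idx) is the earliest minimum of the prefix sums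
def pvBInv (xs : List Int) (s : Int × Int × Int × Int × Int × Int) : Prop :=
  pvGood xs (s.1, s.2.1, s.2.2.1) ∧
  s.2.2.2.1 = pvPfx xs (xs.length : Int) ∧
  0 ≤ s.2.2.2.2.2 ∧ s.2.2.2.2.2 ≤ (xs.length : Int) ∧
  s.2.2.2.2.1 = pvPfx xs s.2.2.2.2.2 ∧
  (∀ i : Int, 0 ≤ i → i ≤ (xs.length : Int) → s.2.2.2.2.1 ≤ pvPfx xs i) ∧
  (∀ i : Int, 0 ≤ i → i < s.2.2.2.2.2 → s.2.2.2.2.1 < pvPfx xs i)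

lemma pvBfold_append (zs : List Int) (x : Int) (hzs : zs ≠ []) :
    pvBfold (zs ++ [x]) = pvBstep (pvBfold zs) ((zs.length : Int), x) := by
  unfold pvBfold
  have hi : PySem.List.pyGetD (zs ++ [x]) 0 0 = PySem.List.pyGetD zs 0 0 := by
    rw [PySem.List.pyGetD_zero, PySem.List.pyGetD_zero]
    cases zs with
    | nil => exact absurd rfl hzs
    | cons a t => simp
  rw [PySem.List.enumerate_append, List.foldl_append, hi]
  simp [PySem.List.enumerate_cons, PySem.List.enumerate_nil]

lemma pvPfx_single (x : Int) : pvPfx [x] 1 = x := by simp [pvPfx]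

lemma pvB_inv (xs : List Int) (hxs : xs ≠ []) : pvBInv xs (pvBfold xs) := by
  induction xs using List.reverseRecOn with
  | nil => exact absurd rfl hxs
  | append_singleton zs x ih =>
    by_cases hz : zs = []
    · subst hz
      simp only [List.nil_append]
      have hb : pvBfold [x] = pvBstep (x, 0, 0, 0, 0, 0) (0, x) := by
        unfold pvBfold
        rw [PySem.List.enumerate_cons, PySem.List.enumerate_nil]
        simp [PySem.List.pyGetD_zero]
      rw [hb]
      have hsv : ∀ i j : Int, 0 ≤ i → i ≤ j → j < 1 → pvSv [x] i j = x := by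
        intro i j u1 u2 u3
        have hi : i = 0 := by omega
        have hj : j = 0 := by omega
        subst hi; subst hj
        simp [pvSv, pvPfx_single x, pvPfx_zero]
      by_cases hx : (0:Int) + x < 0
      · have hb2 : pvBstep ((x:Int), 0, 0, 0, 0, 0) (0, x) = (x, 0, 0, 0 + x, 0 + x, 0 + 1) := by
          unfold pvBstep
          simp only []
          rw [if_neg (by omega), if_pos hx]
        rw [hb2]
        unfold pvBInv pvGood
        simp only [List.length_cons, List.length_nil]
        refine ⟨⟨le_rfl, le_rfl, one_pos, ?_, ?_, ?_⟩, ?_, ?_, ?_, ?_, ?_, ?_⟩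
        · exact (hsv 0 0 le_rfl le_rfl one_pos).symm
        · intro i j u1 u2 u3
          rw [hsv i j u1 u2 u3]
        · intro i j u1 u2 u3 _
          exact Or.inr ⟨by omega, by omega⟩
        · norm_num [pvPfx_single x]
        · norm_num
        · norm_num
        · rw [show (0:Int) + 1 = 1 by ring, pvPfx_single x]; ring
        · intro i u1 u2
          rcases (by omega : i = 0 ∨ i = 1) with rfl | rfl
          · rw [pvPfx_zero]; omega
          · rw [pvPfx_single x]; omega
        · intro i u1 u2
          have hi : i = 0 := by omega
          subst hi
          rw [pvPfx_zero]; omega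
      · have hb2 : pvBstep ((x:Int), 0, 0, 0, 0, 0) (0, x) = (x, 0, 0, 0 + x, 0, 0) := by
          unfold pvBstep
          simp only []
          rw [if_neg (by omega), if_neg hx]
        rw [hb2]
        unfold pvBInv pvGood
        simp only [List.length_cons, List.length_nil]
        refine ⟨⟨le_rfl, le_rfl, one_pos, ?_, ?_, ?_⟩, ?_, ?_, ?_, ?_, ?_, ?_⟩
        · exact (hsv 0 0 le_rfl le_rfl one_pos).symm
        · intro i j u1 u2 u3
          rw [hsv i j u1 u2 u3]
        · intro i j u1 u2 u3 _
          exact Or.inr ⟨by omega, by omega⟩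
        · norm_num [pvPfx_single x]
        · norm_num
        · norm_num
        · rw [pvPfx_zero]
        · intro i u1 u2
          rcases (by omega : i = 0 ∨ i = 1) with rfl | rfl
          · rw [pvPfx_zero]
          · rw [pvPfx_single x]; omega
        · intro i u1 u2
          omega
    · obtain ⟨⟨g1, g2, g3, g4, g5, g6⟩, hpf, hmi0, hmile, hmpv, hmplb, hmpst⟩ := ih hz
      rw [pvBfold_append zs x hz]
      rcases hsv : pvBfold zs with ⟨m, bs, be, pf, mp, mi⟩
      rw [hsv] at g1 g2 g3 g4 g5 g6 hpf hmi0 hmile hmpv hmplb hmpst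
      simp only at g1 g2 g3 g4 g5 g6 hpf hmi0 hmile hmpv hmplb hmpst
      set n : Int := (zs.length : Int) with hn
      have hlen : (((zs ++ [x]).length : Nat) : Int) = n + 1 := by
        simp [hn]
      have hPle : ∀ k : Int, k ≤ n → pvPfx (zs ++ [x]) k = pvPfx zs k := by
        intro k hk
        exact pvPfx_append_le zs x k hk
      have hPfull : pvPfx (zs ++ [x]) (n + 1) = pvPfx zs n + x := pvPfx_append_full zs x
      have hSvt : ∀ i j : Int, 0 ≤ i → i ≤ j → j < n → pvSv (zs ++ [x]) i j = pvSv zs i j := by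
        intro i j u1 u2 u3
        exact pvSv_append zs x i j u1 u2 u3
      have hSvn : ∀ i : Int, 0 ≤ i → i ≤ n → pvSv (zs ++ [x]) i n = (pf + x) - pvPfx zs i := by
        intro i u1 u2
        unfold pvSv
        rw [hPfull, hPle i u2, hpf, hn]
      have hcand : pvSv (zs ++ [x]) mi n = (pf + x) - mp := by
        rw [hSvn mi hmi0 hmile, hmpv]
      unfold pvBstep
      simp only []
      by_cases hbc : m < pf + x - mp
      · refine ⟨⟨?_, ?_, ?_, ?_, ?_, ?_⟩, ?_, ?_, ?_, ?_, ?_, ?_⟩ <;> (try simp only [if_pos hbc, hlen])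
        · exact hmi0
        · exact hmile
        · omega
        · omega
        · intro i j u1 u2 u3
          by_cases hjn : j < n
          · rw [hSvt i j u1 u2 hjn]
            have := g5 i j u1 u2 hjn
            omega
          · have hj : j = n := by omega
            subst hj
            rw [hSvn i u1 (by omega)]
            have := hmplb i u1 (by omega)
            omega
        · intro i j u1 u2 u3 hv
          by_cases hjn : j < n
          · rw [hSvt i j u1 u2 hjn] at hv
            have := g5 i j u1 u2 hjn
            omega
          · have hj : j = n := by omega
            subst hj
            by_cases him : i < mi
            · have h1 := hSvn i u1 (by omega)
              have h2 := hmpst i u1 him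
              omega
            · rcases (by omega : mi < i ∨ mi = i) with h | h
              · exact Or.inl h
              · exact Or.inr ⟨h, le_rfl⟩
        · rw [hPfull, hpf]
        · by_cases hpc : pf + x < mp
          · rw [if_pos hpc]
            dsimp only
            omega
          · rw [if_neg hpc]
            dsimp only
            omega
        · by_cases hpc : pf + x < mp
          · rw [if_pos hpc]
          · rw [if_neg hpc]
            dsimp only
            omega
        · by_cases hpc : pf + x < mp
          · rw [if_pos hpc]
            dsimp only
            rw [hPfull, hpf]
          · rw [if_neg hpc]
            dsimp only
            rw [hmpv, hPle mi hmile]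
        · intro i u1 u2
          by_cases hpc : pf + x < mp
          · rw [if_pos hpc]
            simp only []
            rcases (by omega : i ≤ n ∨ i = n + 1) with h | h
            · rw [hPle i h]
              have := hmplb i u1 h
              omega
            · subst h
              rw [hPfull]
              omega
          · rw [if_neg hpc]
            simp only []
            rcases (by omega : i ≤ n ∨ i = n + 1) with h | h
            · rw [hPle i h]
              exact hmplb i u1 h
            · subst h
              rw [hPfull]
              omega
        · intro i u1 u2
          by_cases hpc : pf + x < mp
          · rw [if_pos hpc] at u2 ⊢
            simp only [] at u2 ⊢
            rcases (by omega : i ≤ n ∨ i = n + 1) with h | h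
            · rw [hPle i h]
              have := hmplb i u1 h
              omega
            · omega
          · rw [if_neg hpc] at u2 ⊢
            simp only [] at u2 ⊢
            have hin : i < mi := u2
            rw [hPle i (by omega)]
            exact hmpst i u1 hin
      · refine ⟨⟨?_, ?_, ?_, ?_, ?_, ?_⟩, ?_, ?_, ?_, ?_, ?_, ?_⟩ <;> (try simp only [if_neg hbc, hlen])
        · exact g1
        · exact g2
        · omega
        · rw [hSvt bs be g1 g2 g3]
          exact g4
        · intro i j u1 u2 u3
          by_cases hjn : j < n
          · rw [hSvt i j u1 u2 hjn]
            exact g5 i j u1 u2 hjn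
          · have hj : j = n := by omega
            subst hj
            rw [hSvn i u1 (by omega)]
            have := hmplb i u1 (by omega)
            omega
        · intro i j u1 u2 u3 hv
          by_cases hjn : j < n
          · rw [hSvt i j u1 u2 hjn] at hv
            exact g6 i j u1 u2 hjn hv
          · have hj : j = n := by omega
            subst hj
            rcases (by omega : bs < i ∨ bs = i ∨ i < bs) with h | h | h
            · exact Or.inl h
            · exact Or.inr ⟨h, by omega⟩
            · exfalso
              -- the contradiction argument: a pair (i, n) with i < bs cannot achieve m
              have hb1 : pvSv zs i be ≤ m := g5 i be u1 (by omega) g3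
              have hb2 : pvSv zs i be ≠ m := by
                intro hEq
                have := g6 i be u1 (by omega) g3 hEq
                unfold pvLexle at this
                omega
              -- δ = pvPfx' (n+1) - pvPfx' (be+1) > 0, so bs..n beats m
              have e1 : pvSv (zs ++ [x]) i n = pvPfx (zs ++ [x]) (n+1) - pvPfx (zs ++ [x]) i := rfl
              have e2 : pvSv (zs ++ [x]) bs n = pvPfx (zs ++ [x]) (n+1) - pvPfx (zs ++ [x]) bs := rfl
              have e3 : pvSv zs i be = pvPfx zs (be+1) - pvPfx zs i := rfl
              have e4 : pvSv zs bs be = pvPfx zs (be+1) - pvPfx zs bs := rfl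
              have t1 : pvPfx (zs ++ [x]) i = pvPfx zs i := hPle i (by omega)
              have t2 : pvPfx (zs ++ [x]) bs = pvPfx zs bs := hPle bs (by omega)
              have hmax_bs : pvSv (zs ++ [x]) bs n ≤ pf + x - mp := by
                rw [hSvn bs g1 (by omega)]
                have := hmplb bs g1 (by omega)
                omega
              omega
        · rw [hPfull, hpf]
        · by_cases hpc : pf + x < mp
          · rw [if_pos hpc]
            dsimp only
            omega
          · rw [if_neg hpc]
            dsimp only
            omega
        · by_cases hpc : pf + x < mp
          · rw [if_pos hpc]
          · rw [if_neg hpc]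
            dsimp only
            omega
        · by_cases hpc : pf + x < mp
          · rw [if_pos hpc]
            dsimp only
            rw [hPfull, hpf]
          · rw [if_neg hpc]
            dsimp only
            rw [hmpv, hPle mi hmile]
        · intro i u1 u2
          by_cases hpc : pf + x < mp
          · rw [if_pos hpc]
            simp only []
            rcases (by omega : i ≤ n ∨ i = n + 1) with h | h
            · rw [hPle i h]
              have := hmplb i u1 h
              omega
            · subst h
              rw [hPfull]
              omega
          · rw [if_neg hpc]
            simp only []
            rcases (by omega : i ≤ n ∨ i = n + 1) with h | h
            · rw [hPle i h]
              exact hmplb i u1 h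
            · subst h
              rw [hPfull]
              omega
        · intro i u1 u2
          by_cases hpc : pf + x < mp
          · rw [if_pos hpc] at u2 ⊢
            simp only [] at u2 ⊢
            rcases (by omega : i ≤ n ∨ i = n + 1) with h | h
            · rw [hPle i h]
              have := hmplb i u1 h
              omega
            · omega
          · rw [if_neg hpc] at u2 ⊢
            simp only [] at u2 ⊢
            have hin : i < mi := u2
            rw [hPle i (by omega)]
            exact hmpst i u1 hin

-- ===== VERDICT (by name: the statement is the Claim_ definition above) =====
theorem calculate_prefix_spec : Claim_equal_calculate_prefix := by
  intro xs _ hpre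
  unfold Spec_calculate_prefix
  have hA : pvGood xs (pvAfold xs) := pvA_good xs hpre
  have hB : pvGood xs ((pvBfold xs).1, (pvBfold xs).2.1, (pvBfold xs).2.2.1) := (pvB_inv xs hpre).1
  have h3 := pvGood_unique xs _ _ hA hB
  rw [pvA_render, pvB_render, h3]
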